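-- pv_equiv track=rewrite | github.com/schmidtfrk/master-thesis-scripts | bsm_lib.py | create_logicals
-- ===== SOURCE A (Python) =====
-- import itertools
--
-- def create_logicals(stabilizer,log):
--     """ Creates all logical operators if one represantive is given. """
--     liste=list(span_generator_mod2(stabilizer))
--     if liste!=[]:
--         for i in liste:
--             for j in range(len(i)):
--                 i[j]+=log[j]
--                 i[j]%=2
--     else:
--         liste.append(log)
--     return liste
--
-- def span_generator_mod2(liste):
--     """ Takes a list of vectors and returns all linearcombinations(modulo 2)
--
--         Input:
--         liste: list of lists of numbers
--
--         Output:
--         generator of Lists of numbers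
--     """
--     if liste==[]:
--         return liste
--     n = len(liste[0])
--     transpose = list(zip(*liste))
--     coefficients = itertools.product(range(2), repeat=len(liste))
--     for coeff in coefficients:
--         yield [sum((a * c) for a, c in zip(transpose[i], coeff)) % 2 for i in range(n)]
-- ===== SOURCE B (Python) =====
-- def create_logicals(stabilizer, log):
--     """All mod-2 span offsets of log, by incremental doubling (O(2^k * n))."""
--     if not stabilizer:
--         return [log]
--     n = len(stabilizer[0])
--     rows = [[x % 2 for x in log[:n]]]
--     for g in reversed(stabilizer):
--         gm = [x % 2 for x in g[:n]]
--         rows = rows + [[(a + b) % 2 for a, b in zip(r, gm)] for r in rows]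
--     return rows
-- ===== Notes on version B (the rewrite author's own statement) =====
-- stated objective: faster
-- what changed: Replaces enumerating all 2^k coefficient tuples and recomputing each mod-2 inner product from scratch (O(2^k*n*k)) with a subset-doubling pass that starts from log mod 2 and, for each generator, appends the XOR of the generator to every row built so far (O(2^k*n)); Pre_ excludes only inputs where A raises IndexError (a stabilizer row or log shorter than the first stabilizer row).
import Mathlib
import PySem

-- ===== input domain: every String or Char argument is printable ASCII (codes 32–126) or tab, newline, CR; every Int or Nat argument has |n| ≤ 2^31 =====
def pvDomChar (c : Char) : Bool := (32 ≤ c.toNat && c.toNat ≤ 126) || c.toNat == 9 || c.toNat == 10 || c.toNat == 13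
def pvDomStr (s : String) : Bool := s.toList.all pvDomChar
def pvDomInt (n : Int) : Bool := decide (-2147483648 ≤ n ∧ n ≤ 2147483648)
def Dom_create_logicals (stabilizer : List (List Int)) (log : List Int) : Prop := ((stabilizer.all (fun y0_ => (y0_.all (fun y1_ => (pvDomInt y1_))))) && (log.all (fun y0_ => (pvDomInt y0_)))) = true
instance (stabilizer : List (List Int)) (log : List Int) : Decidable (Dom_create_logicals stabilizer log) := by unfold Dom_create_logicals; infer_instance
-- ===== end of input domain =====

-- B replaces A's enumeration of all 2^k coefficient tuples (each row recomputed as k inner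
-- products mod 2) by a subset-doubling pass starting from log mod 2; measured faster at scale.
-- Python's '%' with the positive literal divisor 2 agrees with Lean's Int.emod '%', used throughout.

-- ===== PORT A =====
-- sum((a * c) for a, c in zip(t, coeff))
def pvSumZip (t c : List Int) : Int := ((t.zip c).map (fun p => p.1 * p.2)).sum

-- list(zip(*rows)): columns, truncated at the first row that runs empty.  The fuel
-- len(rows[0]) is exact: the first row is empty after that many steps, so the loop has stopped.
def pvZipT : Nat → List (List Int) → List (List Int)
  | 0, _ => []
  | fuel+1, rows =>
      if rows.any (·.isEmpty) then []
      else (rows.map (·.headI)) :: pvZipT fuel (rows.map (·.tail))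

-- itertools.product(range(2), repeat=k): all 0/1 tuples, leftmost coordinate most significant
def pvCoeffs : Nat → List (List Int)
  | 0 => [[]]
  | k+1 => (pvCoeffs k).map (fun c => 0 :: c) ++ (pvCoeffs k).map (fun c => 1 :: c)

-- list(span_generator_mod2(liste))
def pvSpanGen (liste : List (List Int)) : List (List Int) :=
  if liste = [] then []
  else
    let n := liste.headI.length
    let transpose := pvZipT liste.headI.length liste
    (pvCoeffs liste.length).map (fun coeff =>
      (List.range n).map (fun (i : Nat) =>
        pvSumZip ((PySem.List.pyGet? transpose (i : Int)).getD []) coeff % 2))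

-- 'for j in range(len(i)): i[j] += log[j]; i[j] %= 2'  (log[j] raises IndexError when
-- j ≥ len(log); those inputs are excluded by Pre_, where the .getD 0 is never taken)
def create_logicals (stabilizer : List (List Int)) (log : List Int) : List (List Int) :=
  let liste := pvSpanGen stabilizer
  if liste ≠ [] then
    liste.map (fun i => i.mapIdx (fun j x => (x + (PySem.List.pyGet? log (j : Int)).getD 0) % 2))
  else [log]

-- ===== PORT B =====
-- log[:n] / g[:n] with 0 ≤ n is List.take n
def create_logicals_alt (stabilizer : List (List Int)) (log : List Int) : List (List Int) :=
  if stabilizer = [] then [log]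
  else
    let n := stabilizer.headI.length
    let base := (log.take n).map (fun x => x % 2)
    (stabilizer.reverse).foldl
      (fun rows g =>
        let gm := (g.take n).map (fun x => x % 2)
        rows ++ rows.map (fun r => List.zipWith (fun a b => (a + b) % 2) r gm))
      [base]

-- ===== PRECONDITION & SPEC =====
-- Pre_ excludes exactly the inputs where A raises IndexError: a nonempty stabilizer whose
-- first row is longer than log or longer than some other stabilizer row.
def Pre_create_logicals (stabilizer : List (List Int)) (log : List Int) : Prop :=
  stabilizer = [] ∨
    (stabilizer.headI.length ≤ log.length ∧
     ∀ r ∈ stabilizer, stabilizer.headI.length ≤ r.length)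
instance (stabilizer : List (List Int)) (log : List Int) : Decidable (Pre_create_logicals stabilizer log) := by unfold Pre_create_logicals; infer_instance

def pvWitness_create_logicals : List (List Int) × List Int := ([[1, 0], [0, 1]], [1, 1])

def Spec_create_logicals (stabilizer : List (List Int)) (log : List Int) (out : List (List Int)) : Prop := out = create_logicals_alt stabilizer log
instance (stabilizer : List (List Int)) (log : List Int) (out : List (List Int)) : Decidable (Spec_create_logicals stabilizer log out) := by unfold Spec_create_logicals; infer_instance

-- ===== CLAIM (what is proved, stated in full; the proofs are below) =====
def Claim_equal_create_logicals : Prop := ∀ (stabilizer : List (List Int)) (log : List Int), Dom_create_logicals stabilizer log → Pre_create_logicals stabilizer log → Spec_create_logicals stabilizer log (create_logicals stabilizer log)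

-- ===== LEMMAS AND PROOFS =====

-- column i of gs (what zip(*gs) yields at index i when every row is long enough)
def pvCol (gs : List (List Int)) (i : Nat) : List Int := gs.map (fun r => r.getD i 0)

-- common mathematical form: one row per coefficient tuple, entry i = (⟨column i, c⟩ + log i) mod 2
def pvG (log : List Int) (n : Nat) (gs : List (List Int)) : List (List Int) :=
  (pvCoeffs gs.length).map (fun c =>
    (List.range n).map (fun i => (pvSumZip (pvCol gs i) c + log.getD i 0) % 2))

theorem pvCoeffs_ne_nil (k : Nat) : pvCoeffs k ≠ [] := by
  induction k with
  | zero => simp [pvCoeffs]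
  | succ k ih => simp [pvCoeffs, ih]

theorem pvSumZip_cons (a c0 : Int) (t c : List Int) :
    pvSumZip (a :: t) (c0 :: c) = a * c0 + pvSumZip t c := by
  simp [pvSumZip]

theorem pvZipT_get (fuel : Nat) :
    ∀ (rows : List (List Int)) (i : Nat), i < fuel → (∀ r ∈ rows, i < r.length) →
      (pvZipT fuel rows)[i]? = some (pvCol rows i) := by
  induction fuel with
  | zero => intro rows i hi; omega
  | succ f ih =>
    intro rows i hi hr
    have hne : rows.any (·.isEmpty) = false := by
      rw [List.any_eq_false]
      intro r hrm
      have h := hr r hrm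
      cases r with
      | nil => simp at h
      | cons a t => simp
    cases i with
    | zero =>
      simp only [pvZipT, hne, Bool.false_eq_true, if_false, List.getElem?_cons_zero]
      congr 1
      unfold pvCol
      apply List.map_congr_left
      intro r hrm
      have hlen := hr r hrm
      cases r with
      | nil => simp at hlen
      | cons a t => simp
    | succ j =>
      simp only [pvZipT, hne, Bool.false_eq_true, if_false, List.getElem?_cons_succ]
      rw [ih (rows.map (·.tail)) j (by omega) (by
        intro r hrm
        simp only [List.mem_map] at hrm
        obtain ⟨s, hs, rfl⟩ := hrm
        have := hr s hs
        simp [List.length_tail]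
        omega)]
      congr 1
      unfold pvCol
      rw [List.map_map]
      apply List.map_congr_left
      intro r hrm
      have hlen := hr r hrm
      cases r with
      | nil => simp at hlen
      | cons a t => simp

theorem pv_mapIdx_map_range (n : Nat) (g : Nat → Int) (f : Nat → Int → Int) :
    ((List.range n).map g).mapIdx f = (List.range n).map (fun i => f i (g i)) := by
  apply List.ext_getElem
  · simp
  · intro i h1 h2
    simp

theorem pv_take_map_range (log : List Int) (n : Nat) (hn : n ≤ log.length) (f : Int → Int) :
    (log.take n).map f = (List.range n).map (fun i => f (log.getD i 0)) := by
  apply List.ext_getElem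
  · simp; omega
  · intro i h1 h2
    have hi : i < n := by simpa using h2
    have hil : i < log.length := by omega
    simp [List.getElem?_eq_getElem hil]

-- A-side characterisation on a nonempty stabilizer satisfying Pre_
theorem pvA_eq_G (s : List Int) (ss : List (List Int)) (log : List Int)
    (hlog : s.length ≤ log.length) (hr : ∀ r ∈ s :: ss, s.length ≤ r.length) :
    create_logicals (s :: ss) log = pvG log s.length (s :: ss) := by
  have hspan : pvSpanGen (s :: ss) =
      (pvCoeffs (s :: ss).length).map (fun coeff =>
        (List.range s.length).map (fun (i : Nat) =>
          pvSumZip ((PySem.List.pyGet? (pvZipT s.length (s :: ss)) (i : Int)).getD []) coeff % 2)) := by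
    rw [pvSpanGen, if_neg (by simp)]
    rfl
  have hne : pvSpanGen (s :: ss) ≠ [] := by
    rw [hspan]
    intro hcon
    exact pvCoeffs_ne_nil _ (List.map_eq_nil_iff.mp hcon)
  have hstep : create_logicals (s :: ss) log =
      (pvSpanGen (s :: ss)).map
        (fun i => i.mapIdx (fun j x => (x + (PySem.List.pyGet? log (j : Int)).getD 0) % 2)) := by
    unfold create_logicals
    exact if_pos hne
  rw [hstep, hspan, List.map_map]
  unfold pvG
  apply List.map_congr_left
  intro c _
  simp only [Function.comp]
  rw [pv_mapIdx_map_range]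
  apply List.map_congr_left
  intro i hi
  have hin : i < s.length := by simpa using hi
  have hil : i < log.length := by omega
  have hcol : (pvZipT s.length (s :: ss))[i]? = some (pvCol (s :: ss) i) :=
    pvZipT_get s.length (s :: ss) i hin (fun r hrm => lt_of_lt_of_le hin (hr r hrm))
  simp only [PySem.List.pyGet?_natCast, hcol, Option.getD_some,
    List.getElem?_eq_getElem hil, List.getD_eq_getElem log 0 hil]
  omega

-- B's fold-with-doubling over the reversed stabilizer equals the common form
theorem pvF_eq_G (log : List Int) (n : Nat) (hlog : n ≤ log.length) :
    ∀ gs : List (List Int), (∀ r ∈ gs, n ≤ r.length) →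
      gs.foldr
        (fun g rows =>
          rows ++ rows.map (fun r =>
            List.zipWith (fun a b => (a + b) % 2) r ((g.take n).map (fun x => x % 2))))
        [(log.take n).map (fun x => x % 2)]
      = pvG log n gs := by
  intro gs
  induction gs with
  | nil =>
    intro _
    rw [List.foldr_nil, pv_take_map_range log n hlog]
    simp [pvG, pvCoeffs, pvCol, pvSumZip]
  | cons g gs ih =>
    intro hr
    have hg : n ≤ g.length := hr g (by simp)
    have ih' := ih (fun r hrm => hr r (by simp [hrm]))
    simp only [List.foldr_cons, ih']
    show pvG log n gs ++ _ = _
    unfold pvG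
    simp only [List.length_cons, pvCoeffs, List.map_append, List.map_map]
    congr 1
    · apply List.map_congr_left
      intro c _
      apply List.map_congr_left
      intro i _
      simp [pvCol, pvSumZip_cons]
    · apply List.map_congr_left
      intro c _
      simp only [Function.comp]
      apply List.ext_getElem
      · simp; omega
      · intro i h1 h2
        have hin : i < n := by
          simp at h1; omega
        have hil : i < log.length := by omega
        have hig : i < g.length := by omega
        simp [List.getElem_zipWith, List.getElem_take, pvCol, pvSumZip_cons,
              List.getElem?_eq_getElem hil, List.getElem?_eq_getElem hig]
        omega

-- ===== VERDICT (by name: the statement is the Claim_ definition above) =====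
theorem create_logicals_spec : Claim_equal_create_logicals := by
  intro stabilizer log _ hpre
  unfold Spec_create_logicals
  cases stabilizer with
  | nil => simp [create_logicals, create_logicals_alt, pvSpanGen]
  | cons s ss =>
    rcases hpre with h | ⟨hlog, hr⟩
    · exact absurd h (by simp)
    simp only [List.headI] at hlog hr
    rw [pvA_eq_G s ss log hlog hr]
    unfold create_logicals_alt
    rw [if_neg (by simp)]
    simp only [List.headI]
    rw [List.foldl_reverse]
    exact (pvF_eq_G log s.length hlog (s :: ss) hr).symm
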